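-- pv_equiv track=rewrite | github.com/CODRbio/StrainSybionts_mussel | Phylogeny/alignCDSonFaaALN.py | revAlign
-- ===== SOURCE A (Python) =====
-- def revAlign(cds_seq, faa_seqs): #align nucleotides based on peptides, new list with 3 polymer were constructed first
--     mer3 = []
--     cds_align = []
--     pep_count = 0
--     faa = faa_seqs.replace("-","")
--     if len(faa)*3 > len(cds_seq):
--         gap_add = "-" * (len(faa)*3 -len(cds_seq))
--         cds_seq = cds_seq + gap_add
--
--     for num in range(0,len(cds_seq),3):
--         mer3.append(cds_seq[num:(num+3)])
--     for num in range(len(faa_seqs)):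
--         if faa_seqs[num] == "-":
--             cds_align.append("-"*3)
--         else:
--             cds_align.append(mer3[pep_count])
--             pep_count += 1
--     return(cds_align)
-- ===== SOURCE B (Python) =====
-- def revAlign(cds_seq, faa_seqs):
--     out = []
--     rest = cds_seq
--     for ch in faa_seqs:
--         if ch == "-":
--             out.append("---")
--         else:
--             out.append(rest[:3].ljust(3, "-"))
--             rest = rest[3:]
--     return out
-- ===== Notes on version B (the rewrite author's own statement) =====
-- stated objective: simpler
-- what changed: B drops A's faa=replace pass, the global '-'-padding guard and the mer3 codon-table pass entirely: it consumes the CDS as a shrinking stream (rest[:3]/rest[3:]) in one loop over the alignment, right-padding each emitted codon individually with ljust(3,'-').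
import Mathlib
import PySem

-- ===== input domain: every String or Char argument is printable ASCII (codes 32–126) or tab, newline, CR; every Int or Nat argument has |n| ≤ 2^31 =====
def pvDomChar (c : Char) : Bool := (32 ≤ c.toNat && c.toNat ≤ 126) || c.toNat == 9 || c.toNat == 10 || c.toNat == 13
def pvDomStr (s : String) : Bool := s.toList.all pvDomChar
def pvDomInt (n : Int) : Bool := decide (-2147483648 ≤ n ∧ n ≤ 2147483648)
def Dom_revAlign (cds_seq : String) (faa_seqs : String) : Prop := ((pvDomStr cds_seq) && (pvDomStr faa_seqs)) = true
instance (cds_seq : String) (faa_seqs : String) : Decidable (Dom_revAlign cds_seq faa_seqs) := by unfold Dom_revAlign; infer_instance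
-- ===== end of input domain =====

-- B replaces A's three staged passes (strip gaps, pad the whole CDS, build the mer3
-- codon table) by one loop that consumes the CDS as a shrinking stream, padding each
-- emitted codon individually (objective: simpler). A is total; no Pre_.

-- ===== PORT A =====
-- A's mer3[pep_count] index is always in range thanks to the padding guard, so the
-- pyGetD default "" is never used on any input.
def revAlign (cds_seq : String) (faa_seqs : String) : List String :=
  let faa := PySem.Chars.replace faa_seqs.toList ['-'] []
  let cds : List Char :=
    if faa.length * 3 > cds_seq.toList.length then
      cds_seq.toList ++ List.replicate (faa.length * 3 - cds_seq.toList.length) '-'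
    else cds_seq.toList
  let mer3 : List String :=
    (PySem.List.pyRange 0 (cds.length : Int) 3).map
      (fun num => String.ofList (PySem.List.slice cds (some num) (some (num + 3))))
  (faa_seqs.toList.foldl
    (fun (st : List String × Nat) c =>
      if c = '-' then (st.1 ++ [String.ofList (List.replicate 3 '-')], st.2)
      else (st.1 ++ [PySem.List.pyGetD mer3 (st.2 : Int) ""], st.2 + 1))
    ([], 0)).1

-- ===== PORT B =====
-- rest[:3].ljust(3,'-') is ported by hand as take-3 right-padded with '-' to width 3
-- (exact: ljust pads on the right, no truncation since the slice has length ≤ 3).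
def altGo (rest : List Char) : List Char → List String
  | [] => []
  | c :: l =>
    if c = '-' then "---" :: altGo rest l
    else
      let t := PySem.List.slice rest none (some 3)
      String.ofList (t ++ List.replicate (3 - t.length) '-')
        :: altGo (PySem.List.slice rest (some 3) none) l

def revAlign_alt (cds_seq : String) (faa_seqs : String) : List String :=
  altGo cds_seq.toList faa_seqs.toList

-- ===== PRECONDITION & SPEC =====
def Spec_revAlign (cds_seq : String) (faa_seqs : String) (out : List String) : Prop := out = revAlign_alt cds_seq faa_seqs
instance (cds_seq : String) (faa_seqs : String) (out : List String) : Decidable (Spec_revAlign cds_seq faa_seqs out) := by unfold Spec_revAlign; infer_instance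

-- ===== CLAIM (what is proved, stated in full; the proofs are below) =====
def Claim_equal_revAlign : Prop := ∀ (cds_seq : String) (faa_seqs : String), Dom_revAlign cds_seq faa_seqs → Spec_revAlign cds_seq faa_seqs (revAlign cds_seq faa_seqs)

-- ===== LEMMAS AND PROOFS =====

-- str.replace('-','') is exactly the filter dropping '-'.
theorem replace_go_dash (fuel : Nat) (l acc : List Char) (h : l.length ≤ fuel) :
    PySem.Chars.replace.go ['-'] [] fuel l acc = acc.reverse ++ l.filter (· ≠ '-') := by
  induction fuel generalizing l acc with
  | zero =>
    have : l = [] := List.length_eq_zero_iff.mp (Nat.le_zero.mp h)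
    subst this; simp [PySem.Chars.replace.go]
  | succ n ih =>
    cases l with
    | nil => simp [PySem.Chars.replace.go]
    | cons c t =>
      simp only [PySem.Chars.replace.go]
      by_cases hc : c = '-'
      · subst hc
        rw [if_pos (by simp [List.isPrefixOf])]
        rw [ih _ _ (by simpa using Nat.lt_succ_iff.mp (by simpa using h))]
        simp
      · rw [if_neg (by simpa [List.isPrefixOf] using Ne.symm hc)]
        rw [ih _ _ (by simpa using Nat.lt_succ_iff.mp (by simpa using h))]
        simp [hc]

theorem replace_dash_eq_filter (l : List Char) :
    PySem.Chars.replace l ['-'] [] = l.filter (· ≠ '-') := by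
  simp only [PySem.Chars.replace, List.isEmpty_cons, if_neg Bool.false_ne_true]
  simpa using replace_go_dash l.length l [] le_rfl

-- A's codon table mer3, indexed anywhere (default "" past the end), is
-- the k-th 3-slice of the padded CDS; past the end both give "".
theorem mer3_getD_eq_slice (cds : List Char) (k : Nat) :
    PySem.List.pyGetD
      ((PySem.List.pyRange 0 (cds.length : Int) 3).map
        (fun num => String.ofList (PySem.List.slice cds (some num) (some (num + 3)))))
      (k : Int) ""
    = String.ofList (PySem.List.slice cds (some ((3 * k : Nat) : Int)) (some ((3 * k + 3 : Nat) : Int))) := by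
  rw [PySem.List.pyRange_of_pos 0 (cds.length : Int) (by norm_num), PySem.List.pyGetD_natCast]
  rw [List.getD_eq_getElem?_getD, List.getElem?_map, List.getElem?_map]
  rcases Nat.lt_or_ge k ((if (0:Int) < (cds.length:Int) then (((cds.length:Int) - 0 + 3 - 1) / 3).toNat else 0)) with h | h
  · rw [List.getElem?_range h]
    simp only [Option.map_some, Option.getD_some, zero_add]
    norm_cast
  · rw [List.getElem?_eq_none (by simpa using h)]
    simp only [Option.map_none, Option.getD_none]
    have hlen : cds.length ≤ 3 * k := by
      by_cases hc : (0:Int) < (cds.length : Int)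
      · simp only [if_pos hc] at h
        have : ((cds.length : Int) + 2) / 3 ≤ (k : Int) := by
          have := Int.toNat_le.mp h
          omega
        omega
      · have : cds.length = 0 := by omega
        omega
    rw [PySem.List.slice_natCast, List.drop_eq_nil_of_le hlen]
    simp

-- For k below the peptide count, the k-th codon of the globally padded CDS is the
-- k-th 3-chunk of the raw CDS, right-padded with '-' to width 3.
theorem padded_take3 (cds : List Char) (F k : Nat) (hk : k < F) :
    ((if F * 3 > cds.length then cds ++ List.replicate (F * 3 - cds.length) '-' else cds).drop (3 * k)).take 3
    = ((cds.drop (3 * k)).take 3) ++ List.replicate (3 - ((cds.drop (3 * k)).take 3).length) '-' := by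
  by_cases hpad : F * 3 > cds.length
  · rw [if_pos hpad, List.drop_append, List.take_append,
        List.drop_replicate, List.take_replicate]
    congr 2
    simp only [List.length_take, List.length_drop]
    omega
  · rw [if_neg hpad]
    have hlen : 3 * k + 3 ≤ cds.length := by omega
    have : ((cds.drop (3 * k)).take 3).length = 3 := by
      rw [List.length_take, List.length_drop]; omega
    rw [this]
    simp

-- The loop invariant: A's fold over the remaining alignment, with pep_count = k and
-- enough peptides left that mer3 is never indexed past the end, produces B's stream
-- recursion on the CDS with the first 3*k characters consumed.
theorem foldl_eq_altGo (cds : List Char) (F : Nat)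
    (padded : List Char)
    (hp : padded = if F * 3 > cds.length then cds ++ List.replicate (F * 3 - cds.length) '-' else cds)
    (mer3 : List String)
    (hm : mer3 = (PySem.List.pyRange 0 (padded.length : Int) 3).map
        (fun num => String.ofList (PySem.List.slice padded (some num) (some (num + 3)))))
    (l : List Char) (acc : List String) (k : Nat)
    (hb : k + l.countP (fun c => c ≠ '-') ≤ F) :
    (l.foldl
      (fun (st : List String × Nat) c =>
        if c = '-' then (st.1 ++ [String.ofList (List.replicate 3 '-')], st.2)
        else (st.1 ++ [PySem.List.pyGetD mer3 (st.2 : Int) ""], st.2 + 1))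
      (acc, k)).1 = acc ++ altGo (cds.drop (3 * k)) l := by
  induction l generalizing acc k with
  | nil => simp [altGo]
  | cons c rest ih =>
    simp only [List.foldl_cons, altGo]
    by_cases hc : c = '-'
    · rw [if_pos hc, if_pos hc,
          ih _ k (by simpa [hc] using hb)]
      simp
    · have hcount : (c :: rest).countP (fun c => c ≠ '-') = rest.countP (fun c => c ≠ '-') + 1 := by
        simp [hc]
      have hk : k < F := by omega
      have hb' : (k + 1) + rest.countP (fun c => c ≠ '-') ≤ F := by omega
      rw [if_neg hc, if_neg hc, ih _ (k + 1) hb']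
      rw [hm, mer3_getD_eq_slice, hp, PySem.List.slice_natCast]
      have h3 : 3 * k + 3 - 3 * k = 3 := by omega
      rw [h3, padded_take3 cds F k hk]
      have hslice : PySem.List.slice (cds.drop (3 * k)) none (some 3)
          = (cds.drop (3 * k)).take 3 := by
        rw [show ((3:Int)) = ((3:Nat):Int) by norm_num, PySem.List.slice_to_natCast]
      have hdrop : PySem.List.slice (cds.drop (3 * k)) (some 3) none
          = cds.drop (3 * (k + 1)) := by
        rw [show ((3:Int)) = ((3:Nat):Int) by norm_num, PySem.List.slice_from_natCast,
            List.drop_drop]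
        congr 1
      simp [hslice, hdrop]

-- ===== VERDICT (by name: the statement is the Claim_ definition above) =====
theorem revAlign_spec : Claim_equal_revAlign := by
  intro cds_seq faa_seqs _
  unfold Spec_revAlign revAlign revAlign_alt
  have hF := replace_dash_eq_filter faa_seqs.toList
  rw [foldl_eq_altGo cds_seq.toList ((PySem.Chars.replace faa_seqs.toList ['-'] []).length)
        _ rfl _ rfl faa_seqs.toList [] 0
        (by rw [hF, List.countP_eq_length_filter]; simp)]
  simp
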